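-- pv_equiv track=rewrite | github.com/enkutatash/A2SV_study_session | camp/week1/keyboard-row.py | findWords
-- ===== SOURCE A (Python) =====
-- from typing import List
--
-- def findWords(words: List[str]) -> List[str]:
--     oneRow=[]
--     first=set(('q','w','e','r','t','y','u','i','o','p'))
--     second=set(('a','s','d','f','g','h','j','k','l'))
--     third=set(('z','x','c','v','b','n','m'))
--     for i in words:
--         l=set(j for j in i.lower())
--         if first.union(l)==first or second.union(l)==second or third.union(l)==third:
--             oneRow.append(i)
--     return oneRow
-- ===== SOURCE B (Python) =====
-- ROWS = ("qwertyuiop", "asdfghjkl", "zxcvbnm")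
--
-- def _row_of(c):
--     for i, keys in enumerate(ROWS):
--         if c in keys:
--             return i
--     return None
--
-- def findWords(words):
--     result = []
--     for word in words:
--         row = None
--         for c in word:
--             r = _row_of(c.lower())
--             if r is None or (row is not None and r != row):
--                 break
--             row = r
--         else:
--             result.append(word)
--     return result
-- ===== Notes on version B (the rewrite author's own statement) =====
-- stated objective: faster
-- what changed: Replaces A's per-word set construction and three set-union equality comparisons by an early-exit finite-state scan: each word is read character by character keeping only the row of the previous letters, breaking out on the first unknown character or row change, so no sets are built at all.
import Mathlib
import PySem

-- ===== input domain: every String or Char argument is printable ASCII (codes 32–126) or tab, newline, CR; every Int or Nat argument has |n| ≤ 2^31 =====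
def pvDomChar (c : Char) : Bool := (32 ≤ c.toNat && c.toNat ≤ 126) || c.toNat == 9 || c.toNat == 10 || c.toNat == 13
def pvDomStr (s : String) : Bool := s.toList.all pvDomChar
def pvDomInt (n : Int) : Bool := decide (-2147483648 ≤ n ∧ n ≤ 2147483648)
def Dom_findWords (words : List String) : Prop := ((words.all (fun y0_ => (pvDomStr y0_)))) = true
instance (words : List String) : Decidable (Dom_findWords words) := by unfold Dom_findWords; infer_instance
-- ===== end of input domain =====

-- B replaces A's per-word set construction and three set-union comparisons by an
-- early-exit finite-state scan over the word's characters (no sets built; the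
-- timing run measured B faster by a constant factor); same return value on every input.

-- ===== PORT A =====
def pvFirstL : List Char := ['q','w','e','r','t','y','u','i','o','p']
def pvSecondL : List Char := ['a','s','d','f','g','h','j','k','l']
def pvThirdL : List Char := ['z','x','c','v','b','n','m']

def pvFirst : PySem.Set Char := PySem.Set.ofList pvFirstL
def pvSecond : PySem.Set Char := PySem.Set.ofList pvSecondL
def pvThird : PySem.Set Char := PySem.Set.ofList pvThirdL

def findWords (words : List String) : List String :=
  words.foldl (fun oneRow i =>
    let l : PySem.Set Char := PySem.Set.ofList (PySem.Str.lower i).toList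
    if (pvFirst.union l).equal pvFirst || (pvSecond.union l).equal pvSecond
        || (pvThird.union l).equal pvThird
    then oneRow ++ [i] else oneRow) []

-- ===== PORT B =====
-- the module-level tuple ROWS of Source B
def pvROWS : List String := ["qwertyuiop", "asdfghjkl", "zxcvbnm"]

-- _row_of: first row index whose keys contain c ('c in keys' for a single
-- character is exactly membership of c in keys' characters — exact on all inputs)
def pvRowOfGo : List (Int × String) → Char → Option Int
  | [], _ => none
  | (i, keys) :: rest, c => if keys.toList.contains c then some i else pvRowOfGo rest c

def pvRowOf (c : Char) : Option Int := pvRowOfGo (PySem.List.enumerate pvROWS 0) c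

-- the inner for/else loop: state 'row', break on unknown char or row change
def pvScan : List Char → Option Int → Bool
  | [], _ => true
  | c :: cs, row =>
      match pvRowOf (PySem.Chars.lowerChar c) with
      | none => false
      | some r =>
          match row with
          | none => pvScan cs (some r)
          | some r0 => if r ≠ r0 then false else pvScan cs (some r)

def findWords_alt (words : List String) : List String :=
  words.foldl (fun result word =>
    if pvScan word.toList none then result ++ [word] else result) []

-- ===== PRECONDITION & SPEC =====
def Spec_findWords (words : List String) (out : List String) : Prop := out = findWords_alt words
instance (words : List String) (out : List String) : Decidable (Spec_findWords words out) := by unfold Spec_findWords; infer_instance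

-- ===== CLAIM (what is proved, stated in full; the proofs are below) =====
def Claim_equal_findWords : Prop := ∀ (words : List String), Dom_findWords words → Spec_findWords words (findWords words)

-- ===== LEMMAS AND PROOFS =====

-- A's "row.union(l) == row" test is exactly "every char of l lies in row"
theorem pv_union_equal_iff (F : PySem.Set Char) (cs : List Char) :
    (F.union (PySem.Set.ofList cs)).equal F = true ↔ ∀ c ∈ cs, c ∈ F := by
  rw [PySem.Set.equal_iff]
  constructor
  · intro h c hc
    exact (h c).1 ((PySem.Set.mem_union _ _ _).2 (Or.inr ((PySem.Set.mem_ofList _ _).2 hc)))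
  · intro h x
    rw [PySem.Set.mem_union, PySem.Set.mem_ofList]
    exact ⟨fun hx => hx.elim id (h x), Or.inl⟩

-- pvRowOf in closed form: the three row memberships in order
theorem pv_rowOf_eq (c : Char) :
    pvRowOf c = (if c ∈ pvFirstL then some 0 else if c ∈ pvSecondL then some 1
      else if c ∈ pvThirdL then some 2 else none) := by
  have h1 : ("qwertyuiop" : String).toList = pvFirstL := by decide
  have h2 : ("asdfghjkl" : String).toList = pvSecondL := by decide
  have h3 : ("zxcvbnm" : String).toList = pvThirdL := by decide
  simp only [pvRowOf, pvROWS, PySem.List.enumerate_cons, PySem.List.enumerate_nil,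
    pvRowOfGo, h1, h2, h3, List.contains_iff_mem]
  norm_num

-- the rows are pairwise disjoint
set_option maxRecDepth 4096 in
theorem pv_disj_21 : ∀ c ∈ pvSecondL, c ∉ pvFirstL := by
  intro c hc
  simp only [pvSecondL, List.mem_cons, List.not_mem_nil, or_false] at hc
  rcases hc with rfl|rfl|rfl|rfl|rfl|rfl|rfl|rfl|rfl <;> decide
set_option maxRecDepth 4096 in
theorem pv_disj_31 : ∀ c ∈ pvThirdL, c ∉ pvFirstL := by
  intro c hc
  simp only [pvThirdL, List.mem_cons, List.not_mem_nil, or_false] at hc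
  rcases hc with rfl|rfl|rfl|rfl|rfl|rfl|rfl <;> decide
set_option maxRecDepth 4096 in
theorem pv_disj_32 : ∀ c ∈ pvThirdL, c ∉ pvSecondL := by
  intro c hc
  simp only [pvThirdL, List.mem_cons, List.not_mem_nil, or_false] at hc
  rcases hc with rfl|rfl|rfl|rfl|rfl|rfl|rfl <;> decide

theorem pv_rowOf_first {c : Char} (h : c ∈ pvFirstL) : pvRowOf c = some 0 := by
  rw [pv_rowOf_eq]; simp [h]
theorem pv_rowOf_second {c : Char} (h : c ∈ pvSecondL) : pvRowOf c = some 1 := by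
  rw [pv_rowOf_eq]; simp [h, pv_disj_21 c h]
theorem pv_rowOf_third {c : Char} (h : c ∈ pvThirdL) : pvRowOf c = some 2 := by
  rw [pv_rowOf_eq]; simp [h, pv_disj_31 c h, pv_disj_32 c h]

theorem pv_rowOf_cases {c : Char} {r : Int} (h : pvRowOf c = some r) :
    (r = 0 ∧ c ∈ pvFirstL) ∨ (r = 1 ∧ c ∈ pvSecondL) ∨ (r = 2 ∧ c ∈ pvThirdL) := by
  rw [pv_rowOf_eq] at h
  split_ifs at h with h1 h2 h3 <;> simp_all

-- pvScan with a fixed row state accepts exactly "every lowered char has that row"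
theorem pv_scan_some (cs : List Char) (r : Int) :
    pvScan cs (some r) = true ↔ ∀ c ∈ cs, pvRowOf (PySem.Chars.lowerChar c) = some r := by
  induction cs with
  | nil => simp [pvScan]
  | cons c cs ih =>
      simp only [pvScan]
      cases h : pvRowOf (PySem.Chars.lowerChar c) with
      | none => simp [h]
      | some r' =>
          by_cases hr : r' = r
          · subst hr
            simp [h, ih]
          · constructor
            · intro hfalse
              exact absurd hfalse (by simp [hr])
            · intro hall
              exact absurd (Option.some.inj (h.symm.trans (hall c (by simp)))) hr

-- a word whose scan breaks cannot have all its lowered chars in one row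
theorem pv_reject (L : List Char) (k : Int)
    (hrow : ∀ x ∈ L, pvRowOf x = some k) (c : Char) (cs : List Char)
    (h : pvScan (c :: cs) none = false) :
    ((PySem.Set.ofList L).union (PySem.Set.ofList ((c :: cs).map PySem.Chars.lowerChar))).equal
      (PySem.Set.ofList L) = false := by
  by_contra hb
  rw [Bool.not_eq_false, pv_union_equal_iff] at hb
  have hme : ∀ d ∈ c :: cs, pvRowOf (PySem.Chars.lowerChar d) = some k := fun d hd =>
    hrow _ ((PySem.Set.mem_ofList _ _).1 (hb _ (List.mem_map_of_mem hd)))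
  have h0 := hme c (by simp)
  simp only [pvScan, h0] at h
  rw [(pv_scan_some cs k).2 (fun d hd => hme d (List.mem_cons_of_mem _ hd))] at h
  cases h

-- the per-word conditions of A and B agree
theorem pv_word_eq (w : String) :
    ((pvFirst.union (PySem.Set.ofList (PySem.Str.lower w).toList)).equal pvFirst
      || (pvSecond.union (PySem.Set.ofList (PySem.Str.lower w).toList)).equal pvSecond
      || (pvThird.union (PySem.Set.ofList (PySem.Str.lower w).toList)).equal pvThird)
    = pvScan w.toList none := by
  have hlow : (PySem.Str.lower w).toList = w.toList.map PySem.Chars.lowerChar := by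
    simp [PySem.Str.toList_lower, PySem.Chars.lower]
  simp only [hlow]
  generalize w.toList = cs
  rcases Bool.eq_false_or_eq_true (pvScan cs none) with h | h <;> rw [h]
  · -- B accepts: show A accepts
    cases cs with
    | nil =>
        simp
    | cons c cs =>
        cases h0 : pvRowOf (PySem.Chars.lowerChar c) with
        | none =>
            simp only [pvScan, h0] at h
            cases h
        | some r =>
            simp only [pvScan, h0] at h
            rw [pv_scan_some] at h
            have hall : ∀ d ∈ c :: cs, pvRowOf (PySem.Chars.lowerChar d) = some r := by
              intro d hd
              rcases List.mem_cons.1 hd with rfl | hd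
              · exact h0
              · exact h d hd
            have hmem : ∀ (F : PySem.Set Char) (L : List Char),
                (∀ d ∈ c :: cs, PySem.Chars.lowerChar d ∈ L) → F = PySem.Set.ofList L →
                (F.union (PySem.Set.ofList ((c :: cs).map PySem.Chars.lowerChar))).equal F = true := by
              intro F L hin hF
              rw [pv_union_equal_iff]
              intro x hx
              obtain ⟨d, hd, rfl⟩ := List.mem_map.1 hx
              rw [hF]
              exact (PySem.Set.mem_ofList _ _).2 (hin d hd)
            rcases pv_rowOf_cases h0 with ⟨rfl, _⟩ | ⟨rfl, _⟩ | ⟨rfl, _⟩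
            · rw [hmem pvFirst pvFirstL (fun d hd => by
                rcases pv_rowOf_cases (hall d hd) with ⟨_, hm⟩ | ⟨habs, _⟩ | ⟨habs, _⟩
                · exact hm
                · exact absurd habs (by norm_num)
                · exact absurd habs (by norm_num)) rfl]
              simp
            · rw [hmem pvSecond pvSecondL (fun d hd => by
                rcases pv_rowOf_cases (hall d hd) with ⟨habs, _⟩ | ⟨_, hm⟩ | ⟨habs, _⟩
                · exact absurd habs (by norm_num)
                · exact hm
                · exact absurd habs (by norm_num)) rfl]
              simp
            · rw [hmem pvThird pvThirdL (fun d hd => by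
                rcases pv_rowOf_cases (hall d hd) with ⟨habs, _⟩ | ⟨habs, _⟩ | ⟨_, hm⟩
                · exact absurd habs (by norm_num)
                · exact absurd habs (by norm_num)
                · exact hm) rfl]
              simp

  · -- B rejects: show A rejects
    cases cs with
    | nil => simp [pvScan] at h
    | cons c cs =>
        rw [Bool.or_eq_false_iff, Bool.or_eq_false_iff]
        exact ⟨⟨pv_reject pvFirstL 0 (fun x hx => pv_rowOf_first hx) c cs h,
                pv_reject pvSecondL 1 (fun x hx => pv_rowOf_second hx) c cs h⟩,
                pv_reject pvThirdL 2 (fun x hx => pv_rowOf_third hx) c cs h⟩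

-- ===== VERDICT (by name: the statement is the Claim_ definition above) =====
theorem findWords_spec : Claim_equal_findWords := by
  intro words _
  unfold Spec_findWords findWords findWords_alt
  congr 1
  funext acc w
  simp only [pv_word_eq]
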